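-- pv_equiv track=rewrite | github.com/manncodes/verl | scripts/reward_hacking_detector.py | _max_consecutive_repeats
-- ===== SOURCE A (Python) =====
-- def _max_consecutive_repeats(tokens: list[str]) -> int:
--     """Find maximum consecutive identical tokens."""
--     if not tokens:
--         return 0
--
--     max_repeats = 1
--     current_repeats = 1
--
--     for i in range(1, len(tokens)):
--         if tokens[i] == tokens[i - 1]:
--             current_repeats += 1
--             max_repeats = max(max_repeats, current_repeats)
--         else:
--             current_repeats = 1
--
--     return max_repeats
-- ===== SOURCE B (Python) =====
-- from itertools import groupby
--
--
-- def _max_consecutive_repeats(tokens: list[str]) -> int: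
--     """Find maximum consecutive identical tokens."""
--     return max((sum(1 for _ in g) for _, g in groupby(tokens)), default=0)
-- ===== Notes on version B (the rewrite author's own statement) =====
-- stated objective: idiomatic
-- what changed: Replaces the index loop threading running/max counters with itertools.groupby: tokens are split into maximal runs of identical consecutive tokens and the answer is the max of the run lengths (default=0 on empty input).
import Mathlib
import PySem

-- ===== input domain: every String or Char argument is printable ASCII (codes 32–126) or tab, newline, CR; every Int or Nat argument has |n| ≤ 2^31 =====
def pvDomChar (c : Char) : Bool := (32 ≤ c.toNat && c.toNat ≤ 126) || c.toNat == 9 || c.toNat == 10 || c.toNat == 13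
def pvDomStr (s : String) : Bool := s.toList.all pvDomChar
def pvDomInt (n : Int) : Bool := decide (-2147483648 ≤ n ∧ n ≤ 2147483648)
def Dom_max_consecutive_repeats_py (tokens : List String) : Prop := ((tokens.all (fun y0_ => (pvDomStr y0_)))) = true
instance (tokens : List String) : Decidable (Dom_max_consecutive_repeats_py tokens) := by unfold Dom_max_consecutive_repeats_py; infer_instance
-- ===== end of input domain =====

-- B replaces A's index loop with counters by grouping tokens into maximal runs and taking the
-- max of the run lengths (idiomatic, same cost); return values proved equal on all inputs.

-- ===== PORT A =====
-- literal port of A: early return on empty, then a loop over range(1, len(tokens))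
-- threading the (max_repeats, current_repeats) pair.
def max_consecutive_repeats_py (tokens : List String) : Int :=
  if tokens = [] then 0
  else
    let st := (PySem.List.pyRange 1 (PySem.List.len tokens) 1).foldl
      (fun (st : Int × Int) i =>
        if PySem.List.pyGetD tokens i "" = PySem.List.pyGetD tokens (i - 1) "" then
          (max st.1 (st.2 + 1), st.2 + 1)
        else
          (st.1, 1)) (1, 1)
    st.1

-- ===== PORT B =====
-- itertools.groupby over the tokens: `pvRunGo x n rest` finishes the current run of `x`
-- (seen `n` times so far) and emits the length of each subsequent maximal run.
def pvRunGo (x : String) (n : Nat) : List String → List Nat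
  | [] => [n]
  | y :: ys => if y = x then pvRunGo x (n + 1) ys else n :: pvRunGo y 1 ys

def pvRunLengths : List String → List Nat
  | [] => []
  | x :: xs => pvRunGo x 1 xs

-- max(run lengths, default=0)
def max_consecutive_repeats_py_alt (tokens : List String) : Int :=
  (pvRunLengths tokens).foldl (fun (a : Int) (n : Nat) => max a (n : Int)) 0

-- ===== PRECONDITION & SPEC =====
def Spec_max_consecutive_repeats_py (tokens : List String) (out : Int) : Prop := out = max_consecutive_repeats_py_alt tokens
instance (tokens : List String) (out : Int) : Decidable (Spec_max_consecutive_repeats_py tokens out) := by unfold Spec_max_consecutive_repeats_py; infer_instance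

-- ===== CLAIM (what is proved, stated in full; the proofs are below) =====
def Claim_equal_max_consecutive_repeats_py : Prop := ∀ (tokens : List String), Dom_max_consecutive_repeats_py tokens → Spec_max_consecutive_repeats_py tokens (max_consecutive_repeats_py tokens)

-- ===== LEMMAS AND PROOFS =====

-- structural form of A's loop: walk the remaining tokens carrying the previous token
def pvALoop (prev : String) (st : Int × Int) : List String → Int × Int
  | [] => st
  | y :: ys =>
      pvALoop y (if y = prev then (max st.1 (st.2 + 1), st.2 + 1) else (st.1, 1)) ys

-- A's index loop over `tokens = init ++ prev :: rest` from index `init.length + 1` equals pvALoop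
theorem pvALoop_eq (rest : List String) : ∀ (init : List String) (prev : String)
    (tokens : List String) (st : Int × Int), tokens = init ++ prev :: rest →
    (PySem.List.pyRange ((init.length + 1 : Nat)) ((tokens.length : Nat)) 1).foldl
      (fun (st : Int × Int) i =>
        if PySem.List.pyGetD tokens i "" = PySem.List.pyGetD tokens (i - 1) "" then
          (max st.1 (st.2 + 1), st.2 + 1)
        else
          (st.1, 1)) st
    = pvALoop prev st rest := by
  induction rest with
  | nil =>
      intro init prev tokens st h
      subst h
      have hlen : ((init ++ [prev]).length : Int) ≤ (((init.length + 1 : Nat)) : Int) := by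
        simp
      rw [show ((init ++ prev :: ([] : List String)).length : Int) = ((init ++ [prev]).length : Int) by rfl,
        PySem.List.pyRange_one_eq_nil hlen]
      rfl
  | cons y ys ih =>
      intro init prev tokens st h
      have hlen : (((init.length + 1 : Nat)) : Int) < (tokens.length : Int) := by
        subst h; push_cast; simp
      rw [PySem.List.pyRange_one_cons hlen, List.foldl_cons]
      have hy : PySem.List.pyGetD tokens ((init.length + 1 : Nat)) "" = y := by
        subst h
        rw [PySem.List.pyGetD_natCast]
        simp [List.getD]
      have hprev : PySem.List.pyGetD tokens (((init.length + 1 : Nat) : Int) - 1) "" = prev := by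
        subst h
        have : (((init.length + 1 : Nat) : Int) - 1) = ((init.length : Nat) : Int) := by push_cast; ring
        rw [this, PySem.List.pyGetD_natCast]
        simp [List.getD]
      have htail : (((init.length + 1 : Nat) : Int) + 1) = (((init ++ [prev]).length + 1 : Nat) : Int) := by
        simp
      rw [hy, hprev, htail,
        ih (init ++ [prev]) y tokens _ (by simp [h])]
      simp only [pvALoop]

-- pvRunGo always returns a nonempty list whose head is at least the count carried in
theorem pvRunGo_head (ys : List String) : ∀ (x : String) (n : Nat),
    ∃ h t, pvRunGo x n ys = h :: t ∧ n ≤ h := by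
  induction ys with
  | nil => intro x n; exact ⟨n, [], rfl, le_refl n⟩
  | cons y ys ih =>
      intro x n
      by_cases hyx : y = x
      · obtain ⟨h, t, heq, hle⟩ := ih x (n + 1)
        exact ⟨h, t, by simp [pvRunGo, hyx, heq], by omega⟩
      · exact ⟨n, pvRunGo y 1 ys, by simp [pvRunGo, hyx], le_refl n⟩

-- A's loop computes the running max over the run lengths that B emits
theorem pvALoop_runGo (rest : List String) : ∀ (prev : String) (m c : Int),
    0 < c → c ≤ m →
    (pvALoop prev (m, c) rest).1
      = (pvRunGo prev c.toNat rest).foldl (fun (a : Int) (n : Nat) => max a (n : Int)) m := by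
  induction rest with
  | nil =>
      intro prev m c hc hcm
      simp [pvALoop, pvRunGo]
      omega
  | cons y ys ih =>
      intro prev m c hc hcm
      by_cases hyx : y = prev
      · simp only [pvALoop, pvRunGo, hyx, if_pos]
        rw [ih prev (max m (c + 1)) (c + 1) (by omega) (by omega)]
        have hct : (c + 1).toNat = c.toNat + 1 := by omega
        rw [hct]
        obtain ⟨h, t, heq, hle⟩ := pvRunGo_head ys prev (c.toNat + 1)
        rw [heq, List.foldl_cons, List.foldl_cons]
        congr 1
        omega
      · simp only [pvALoop, pvRunGo, if_neg hyx]
        rw [ih y m 1 (by omega) (by omega), List.foldl_cons]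
        congr 1
        omega

-- ===== VERDICT (by name: the statement is the Claim_ definition above) =====
theorem max_consecutive_repeats_py_spec : Claim_equal_max_consecutive_repeats_py := by
  intro tokens _
  unfold Spec_max_consecutive_repeats_py max_consecutive_repeats_py max_consecutive_repeats_py_alt
  cases tokens with
  | nil => rfl
  | cons t ts =>
      simp only [if_neg (by simp : ¬ (t :: ts = []))]
      rw [show PySem.List.pyRange 1 (PySem.List.len (t :: ts)) 1
            = PySem.List.pyRange ((([] : List String).length + 1 : Nat)) (((t :: ts).length : Nat)) 1 by
          simp [PySem.List.len_eq]]
      rw [pvALoop_eq ts [] t (t :: ts) (1, 1) rfl]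
      rw [pvALoop_runGo ts t 1 1 (by omega) (le_refl 1)]
      show (pvRunGo t 1 ts).foldl (fun (a : Int) (n : Nat) => max a (n : Int)) 1
          = (pvRunLengths (t :: ts)).foldl (fun (a : Int) (n : Nat) => max a (n : Int)) 0
      obtain ⟨h, tl, heq, hle⟩ := pvRunGo_head ts t 1
      rw [show pvRunLengths (t :: ts) = pvRunGo t 1 ts from rfl, heq,
        List.foldl_cons, List.foldl_cons]
      congr 1
      omega
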